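-- pv_equiv track=rewrite | github.com/pchagas72/advent-of-code | 2022/python/3/solve.py | divide_groups
-- ===== SOURCE A (Python) =====
-- def divide_groups(data):
--         groups_divided = []
--         counter = 0
--         gs1 = []
--         gs2 = []
--         gs3 = []
--         for group in data:
--             group = group.replace("\n", "")
--             if counter == 0:
--                 gs1.append(group)
--                 counter += 1
--             elif counter == 1:
--                 gs2.append(group)
--                 counter += 1
--             elif counter == 2:
--                 gs3.append(group)
--                 counter = 0
--         return (gs1, gs2, gs3)
-- ===== SOURCE B (Python) =====
-- def divide_groups(data):
--     cleaned = [g.replace("\n", "") for g in data]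
--     gs1, gs2, gs3 = [], [], []
--     for i in range(0, len(cleaned), 3):
--         chunk = cleaned[i:i+3]
--         gs1 += chunk[0:1]
--         gs2 += chunk[1:2]
--         gs3 += chunk[2:3]
--     return (gs1, gs2, gs3)
-- ===== Notes on version B (the rewrite author's own statement) =====
-- stated objective: alternative
-- what changed: Replaces the per-element counter/branch state machine with a one-shot cleaning comprehension followed by a chunked traversal: one loop over range(0, n, 3) that slices each 3-chunk and appends its positions 0/1/2 to the three groups.
import Mathlib
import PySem

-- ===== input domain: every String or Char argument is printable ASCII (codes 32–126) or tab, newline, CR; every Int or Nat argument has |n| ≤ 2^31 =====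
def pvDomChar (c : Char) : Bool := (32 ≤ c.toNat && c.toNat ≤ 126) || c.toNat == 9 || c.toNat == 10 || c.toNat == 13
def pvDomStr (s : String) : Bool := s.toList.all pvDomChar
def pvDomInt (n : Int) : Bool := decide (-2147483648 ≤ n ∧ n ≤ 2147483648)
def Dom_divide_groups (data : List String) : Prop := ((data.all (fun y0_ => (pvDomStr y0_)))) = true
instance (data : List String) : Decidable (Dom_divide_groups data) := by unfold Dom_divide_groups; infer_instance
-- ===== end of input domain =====

-- ===== PORT A =====
-- B replaces the counter/branch state machine by clean-once + a chunk-of-3 loop; return values proved equal.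
-- Literal port of A: a fold over data carrying (counter, gs1, gs2, gs3), branching on the counter.
def divide_groups (data : List String) : List String × List String × List String :=
  let st := data.foldl
    (fun (st : Int × List String × List String × List String) group =>
      let group := PySem.Str.replace group "\n" ""
      let (counter, gs1, gs2, gs3) := st
      if counter = 0 then (counter + 1, gs1 ++ [group], gs2, gs3)
      else if counter = 1 then (counter + 1, gs1, gs2 ++ [group], gs3)
      else if counter = 2 then (0, gs1, gs2, gs3 ++ [group])
      else (counter, gs1, gs2, gs3))
    (0, [], [], [])
  (st.2.1, st.2.2.1, st.2.2.2)

-- ===== PORT B =====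
-- Literal port of Source B: clean once, then for i in range(0, len, 3) slice the 3-chunk and
-- append chunk[0:1]/chunk[1:2]/chunk[2:3] to the three groups.
def divide_groups_alt (data : List String) : List String × List String × List String :=
  let cleaned := data.map (fun g => PySem.Str.replace g "\n" "")
  (PySem.List.pyRange 0 (cleaned.length : Int) 3).foldl
    (fun (st : List String × List String × List String) i =>
      let chunk := PySem.List.slice cleaned (some i) (some (i + 3))
      (st.1 ++ PySem.List.slice chunk (some 0) (some 1),
       st.2.1 ++ PySem.List.slice chunk (some 1) (some 2),
       st.2.2 ++ PySem.List.slice chunk (some 2) (some 3)))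
    ([], [], [])

-- ===== PRECONDITION & SPEC =====
def Spec_divide_groups (data : List String) (out : List String × List String × List String) : Prop := out = divide_groups_alt data
instance (data : List String) (out : List String × List String × List String) : Decidable (Spec_divide_groups data out) := by unfold Spec_divide_groups; infer_instance

-- ===== CLAIM (what is proved, stated in full; the proofs are below) =====
def Claim_equal_divide_groups : Prop := ∀ (data : List String), Dom_divide_groups data → Spec_divide_groups data (divide_groups data)

-- ===== LEMMAS AND PROOFS =====

-- proof-side specification both loops are reduced to: round-robin split in chunks of three
def pvSplit3 (xs : List String) : List String × List String × List String :=
  if _h : xs = [] then ([], [], [])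
  else
    let r := pvSplit3 (xs.drop 3)
    (xs.take 1 ++ r.1, ((xs.drop 1).take 1) ++ r.2.1, ((xs.drop 2).take 1) ++ r.2.2)
termination_by xs.length
decreasing_by
  cases xs with
  | nil => exact absurd rfl _h
  | cons a t => simp

lemma pvSplit3_nil : pvSplit3 [] = ([], [], []) := by
  rw [pvSplit3]; simp

lemma pvSplit3_cons3 (a b c : String) (t : List String) :
    pvSplit3 (a :: b :: c :: t) =
      (a :: (pvSplit3 t).1, b :: (pvSplit3 t).2.1, c :: (pvSplit3 t).2.2) := by
  rw [pvSplit3]; simp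

lemma pvSplit3_one (a : String) : pvSplit3 [a] = ([a], [], []) := by
  rw [pvSplit3]; simp [pvSplit3_nil]

lemma pvSplit3_two (a b : String) : pvSplit3 [a, b] = ([a], [b], []) := by
  rw [pvSplit3]; simp [pvSplit3_nil]

lemma pvSplit3_expand (xs : List String) (h : xs ≠ []) :
    pvSplit3 xs = (xs.take 1 ++ (pvSplit3 (xs.drop 3)).1,
      ((xs.drop 1).take 1) ++ (pvSplit3 (xs.drop 3)).2.1,
      ((xs.drop 2).take 1) ++ (pvSplit3 (xs.drop 3)).2.2) := by
  rw [pvSplit3]; simp [h]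

-- one step of A's loop, on an already-cleaned element
def pvStep (st : Int × List String × List String × List String) (g : String) :
    Int × List String × List String × List String :=
  let (counter, gs1, gs2, gs3) := st
  if counter = 0 then (counter + 1, gs1 ++ [g], gs2, gs3)
  else if counter = 1 then (counter + 1, gs1, gs2 ++ [g], gs3)
  else if counter = 2 then (0, gs1, gs2, gs3 ++ [g])
  else (counter, gs1, gs2, gs3)

-- one step of B's loop over a fixed cleaned list
def pvStepB (cleaned : List String) (st : List String × List String × List String) (i : Int) :
    List String × List String × List String :=
  let chunk := PySem.List.slice cleaned (some i) (some (i + 3))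
  (st.1 ++ PySem.List.slice chunk (some 0) (some 1),
   st.2.1 ++ PySem.List.slice chunk (some 1) (some 2),
   st.2.2 ++ PySem.List.slice chunk (some 2) (some 3))

lemma pvLoopA_eq (n : Nat) : ∀ (ys : List String), ys.length ≤ n → ∀ g1 g2 g3 : List String,
    (fun st => (st.2.1, st.2.2.1, st.2.2.2)) (ys.foldl pvStep (0, g1, g2, g3)) =
      (g1 ++ (pvSplit3 ys).1, g2 ++ (pvSplit3 ys).2.1, g3 ++ (pvSplit3 ys).2.2) := by
  induction n with
  | zero =>
    intro ys hlen g1 g2 g3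
    have : ys = [] := List.eq_nil_of_length_eq_zero (Nat.le_zero.mp hlen)
    subst this; simp [pvSplit3_nil]
  | succ n ih =>
    intro ys hlen g1 g2 g3
    match ys with
    | [] => simp [pvSplit3_nil]
    | [a] => simp [pvSplit3_one, pvStep, List.foldl]
    | [a, b] => simp [pvSplit3_two, pvStep, List.foldl]
    | a :: b :: c :: t =>
      have : (a :: b :: c :: t).foldl pvStep (0, g1, g2, g3) =
          t.foldl pvStep (0, g1 ++ [a], g2 ++ [b], g3 ++ [c]) := by
        simp [List.foldl, pvStep]
      rw [this]
      have hrec := ih t (by simp at hlen; omega) (g1 ++ [a]) (g2 ++ [b]) (g3 ++ [c])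
      rw [hrec, pvSplit3_cons3]
      simp

lemma pvRange3_cons (a b : Int) (h : a < b) :
    PySem.List.pyRange a b 3 = a :: PySem.List.pyRange (a + 3) b 3 := by
  rw [PySem.List.pyRange_of_pos a b (by norm_num),
      PySem.List.pyRange_of_pos (a + 3) b (by norm_num)]
  by_cases h3 : a + 3 < b
  · have hc : (if a < b then ((b - a + 3 - 1) / 3).toNat else 0) =
        (if a + 3 < b then ((b - (a + 3) + 3 - 1) / 3).toNat else 0) + 1 := by
      simp only [if_pos h, if_pos h3]; omega
    rw [hc, List.range_succ_eq_map, List.map_cons, List.map_map]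
    congr 1
    · push_cast; ring
    · exact List.map_congr_left (fun k _ => by simp [Function.comp]; ring)
  · have hc : (if a < b then ((b - a + 3 - 1) / 3).toNat else 0) = 1 := by
      simp only [if_pos h]; omega
    simp [hc, if_neg h3, List.range_succ]

lemma pvLoopB_eq (n : Nat) : ∀ (m : Nat) (ys : List String), ys.length ≤ m + n →
    ∀ g1 g2 g3 : List String,
    (PySem.List.pyRange (m : Int) (ys.length : Int) 3).foldl (pvStepB ys) (g1, g2, g3) =
      (g1 ++ (pvSplit3 (ys.drop m)).1, g2 ++ (pvSplit3 (ys.drop m)).2.1,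
       g3 ++ (pvSplit3 (ys.drop m)).2.2) := by
  induction n with
  | zero =>
    intro m ys hlen g1 g2 g3
    have hge : ys.length ≤ m := by omega
    have hr : PySem.List.pyRange (m : Int) (ys.length : Int) 3 = [] := by
      rw [PySem.List.pyRange_of_pos _ _ (by norm_num)]
      simp [show ¬ ((m : Int) < (ys.length : Int)) by exact_mod_cast not_lt.mpr hge]
    have hd : ys.drop m = [] := List.drop_eq_nil_of_le hge
    simp [hr, hd, pvSplit3_nil]
  | succ n ih =>
    intro m ys hlen g1 g2 g3
    by_cases hm : m < ys.length
    · rw [pvRange3_cons _ _ (by exact_mod_cast hm)]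
      simp only [List.foldl_cons]
      have hchunk : PySem.List.slice ys (some (m : Int)) (some ((m : Int) + 3)) =
          (ys.drop m).take 3 := by
        exact_mod_cast PySem.List.slice_natCast_add ys m 3
      have hstep : pvStepB ys (g1, g2, g3) (m : Int) =
          (g1 ++ ((ys.drop m).take 3).take 1,
           g2 ++ (((ys.drop m).take 3).drop 1).take 1,
           g3 ++ (((ys.drop m).take 3).drop 2).take 1) := by
        simp only [pvStepB, hchunk]
        rw [PySem.List.slice_toNat _ (by norm_num) (by norm_num),
            PySem.List.slice_toNat _ (by norm_num) (by norm_num),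
            PySem.List.slice_toNat _ (by norm_num) (by norm_num)]
        norm_num
        simp [show ((2:Int)).toNat = 2 from rfl, show ((3:Int)).toNat = 3 from rfl]
      rw [hstep]
      have hcast : ((m : Int) + 3) = ((m + 3 : Nat) : Int) := by push_cast; ring
      rw [hcast, ih (m + 3) ys (by omega)]
      have hne : ys.drop m ≠ [] := by
        intro hnil
        have := List.drop_eq_nil_iff.mp hnil
        omega
      rw [pvSplit3_expand (ys.drop m) hne]
      simp [List.take_take, List.drop_take, List.drop_drop, List.append_assoc]
    · have hge : ys.length ≤ m := not_lt.mp hm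
      have hr : PySem.List.pyRange (m : Int) (ys.length : Int) 3 = [] := by
        rw [PySem.List.pyRange_of_pos _ _ (by norm_num)]
        simp [show ¬ ((m : Int) < (ys.length : Int)) by exact_mod_cast not_lt.mpr hge]
      have hd : ys.drop m = [] := List.drop_eq_nil_of_le hge
      simp [hr, hd, pvSplit3_nil]

-- ===== VERDICT (by name: the statement is the Claim_ definition above) =====
theorem divide_groups_spec : Claim_equal_divide_groups := by
  intro data _
  unfold Spec_divide_groups divide_groups divide_groups_alt
  have hmap : data.foldl
      (fun (st : Int × List String × List String × List String) group =>
        let group := PySem.Str.replace group "\n" ""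
        let (counter, gs1, gs2, gs3) := st
        if counter = 0 then (counter + 1, gs1 ++ [group], gs2, gs3)
        else if counter = 1 then (counter + 1, gs1, gs2 ++ [group], gs3)
        else if counter = 2 then (0, gs1, gs2, gs3 ++ [group])
        else (counter, gs1, gs2, gs3))
      (0, [], [], []) =
      (data.map (fun g => PySem.Str.replace g "\n" "")).foldl pvStep (0, [], [], []) := by
    rw [List.foldl_map]
    rfl
  set ys := data.map (fun g => PySem.Str.replace g "\n" "") with hys
  have hA := pvLoopA_eq ys.length ys le_rfl [] [] []
  have hB := pvLoopB_eq ys.length 0 ys (by omega) [] [] []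
  simp only [List.nil_append, List.drop_zero] at hA hB
  have hBfold : (PySem.List.pyRange ((0 : Nat) : Int) (ys.length : Int) 3).foldl
      (pvStepB ys) ([], [], []) = pvSplit3 ys := by
    rw [hB]
  simp only [hmap]
  rw [hA]
  have : ((0 : Nat) : Int) = (0 : Int) := rfl
  rw [this] at hBfold
  exact hBfold.symm
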